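-- pv_equiv track=rewrite | github.com/Swapnil05Rai/gfgpotd | lastball.py | find_modified_bowl
-- ===== SOURCE A (Python) =====
-- def find_modified_bowl(bowls):
--   # Start from the last bowl
--   for i in range(len(bowls)-1, -1, -1):
--     if bowls[i] < 9:
--       # There is space in this bowl, so we add the marble
--       bowls[i] += 1
--       return i + 1 # Return one-based index
--     else:
--       # No space in this bowl, so we set it to zero and move on to the next bowl
--       bowls[i] = 0
--   return -1 # All bowls are full
-- ===== SOURCE B (Python) =====
-- def find_modified_bowl(bowls):
--     # Single left-to-right pass: keep the latest index of a non-full bowl,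
--     # then perform the same in-place writes as the original would.
--     j = -1
--     for k, v in enumerate(bowls):
--         if v < 9:
--             j = k
--     if j == -1:
--         for k in range(len(bowls)):
--             bowls[k] = 0
--         return -1
--     bowls[j] += 1
--     for k in range(j + 1, len(bowls)):
--         bowls[k] = 0
--     return j + 1
-- ===== Notes on version B (the rewrite author's own statement) =====
-- stated objective: alternative
-- what changed: B replaces A's right-to-left carry scan (which zeroes bowls while searching) by a single left-to-right pass over enumerate(bowls) that accumulates the latest index of a non-full bowl, followed by a separate write phase; the loop direction, loop state and decomposition all differ.
import Mathlib
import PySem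

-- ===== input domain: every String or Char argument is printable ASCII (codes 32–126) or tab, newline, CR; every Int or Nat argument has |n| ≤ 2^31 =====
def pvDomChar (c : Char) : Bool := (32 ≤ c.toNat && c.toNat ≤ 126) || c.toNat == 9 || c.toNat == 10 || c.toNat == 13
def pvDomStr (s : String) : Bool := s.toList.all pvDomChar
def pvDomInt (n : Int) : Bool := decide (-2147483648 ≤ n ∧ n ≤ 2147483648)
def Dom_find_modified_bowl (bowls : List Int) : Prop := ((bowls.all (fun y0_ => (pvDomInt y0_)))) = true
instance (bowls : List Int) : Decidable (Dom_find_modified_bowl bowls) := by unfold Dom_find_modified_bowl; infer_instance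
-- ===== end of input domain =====

-- B replaces A's right-to-left carrying scan by a left-to-right pass accumulating the latest
-- non-full index, plus a separate write phase; both mutate `bowls` identically in Python, and
-- the equivalence proved here is about the return value.


-- ===== PORT A =====
-- the loop `for i in range(len(bowls)-1, -1, -1)`; every index visited is in range,
-- so bowls[i] is ported as pyGetD with default 0 (never taken).  The in-place writes
-- bowls[i] += 1 / bowls[i] = 0 do not affect later reads (indices strictly decrease),
-- so the returned value is computed from the original list.
def pvA_go (bowls : List Int) : List Int → Int
  | [] => -1
  | i :: rest =>
    if PySem.List.pyGetD bowls i 0 < 9 then i + 1 else pvA_go bowls rest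

def find_modified_bowl (bowls : List Int) : Int :=
  pvA_go bowls (PySem.List.pyRange (PySem.List.len bowls - 1) (-1) (-1))

-- ===== PORT B =====
-- Source B: j = -1; for k, v in enumerate(bowls): if v < 9: j = k   — then the writes (which do
-- not affect the return value), and the return: -1 if j == -1 else j + 1.
def find_modified_bowl_alt (bowls : List Int) : Int :=
  let j := (PySem.List.enumerate bowls 0).foldl
      (fun acc kv => if kv.2 < 9 then kv.1 else acc) (-1)
  if j = -1 then -1 else j + 1

-- ===== PRECONDITION & SPEC =====
def Spec_find_modified_bowl (bowls : List Int) (out : Int) : Prop := out = find_modified_bowl_alt bowls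
instance (bowls : List Int) (out : Int) : Decidable (Spec_find_modified_bowl bowls out) := by unfold Spec_find_modified_bowl; infer_instance

-- ===== CLAIM (what is proved, stated in full; the proofs are below) =====
def Claim_equal_find_modified_bowl : Prop := ∀ (bowls : List Int), Dom_find_modified_bowl bowls → Spec_find_modified_bowl bowls (find_modified_bowl bowls)

-- ===== LEMMAS AND PROOFS =====

-- A 'keep the last hit' foldl equals find? over the reversed list.
theorem pv_foldl_last {α β : Type} (p : α → Prop) [DecidablePred p] (f : α → β) :
    ∀ (ys : List α) (a : β),
      ys.foldl (fun acc y => if p y then f y else acc) a =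
        (match ys.reverse.find? (fun y => decide (p y)) with
         | none => a
         | some y => f y) := by
  intro ys
  induction ys with
  | nil => intro a; simp
  | cons x rest ih =>
    intro a
    simp only [List.foldl_cons, ih, List.reverse_cons, List.find?_append]
    cases h : rest.reverse.find? (fun y => decide (p y)) with
    | none => by_cases hp : p x <;> simp [List.find?, hp]
    | some y => simp

-- A's countdown scan over nat indices agrees with find? over the same index list.
theorem pvA_go_eq_find? (bowls : List Int) (l : List Nat) :
    pvA_go bowls (l.map Int.ofNat) =
      (match l.find? (fun k => bowls.getD k 0 < 9) with
       | none => -1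
       | some j => (j : Int) + 1) := by
  induction l with
  | nil => simp [pvA_go]
  | cons k rest ih =>
    simp only [List.map_cons, Int.ofNat_eq_natCast, pvA_go, PySem.List.pyGetD_natCast, List.find?_cons]
    by_cases h : bowls[k]?.getD 0 < 9 <;> simp [List.getD, h, ih]

theorem pvA_eq_common (bowls : List Int) :
    find_modified_bowl bowls =
      (match (List.range bowls.length).reverse.find? (fun k => bowls.getD k 0 < 9) with
       | none => -1
       | some j => (j : Int) + 1) := by
  unfold find_modified_bowl
  have h1 : PySem.List.pyRange (PySem.List.len bowls - 1) (-1) (-1)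
      = ((List.range bowls.length).reverse).map Int.ofNat := by
    rw [PySem.List.pyRange_neg_one_eq_reverse, List.map_reverse]
    congr 1
    have h0 : (-1 : Int) + 1 = 0 := by ring
    have h2 : PySem.List.len bowls - 1 + 1 = (bowls.length : Int) := by
      simp [PySem.List.len_eq]
    rw [h0, h2, PySem.List.pyRange_zero_nat]
    rfl
  rw [h1, pvA_go_eq_find? bowls]

theorem pvB_eq_common (bowls : List Int) :
    find_modified_bowl_alt bowls =
      (match (List.range bowls.length).reverse.find? (fun k => bowls.getD k 0 < 9) with
       | none => -1
       | some j => (j : Int) + 1) := by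
  unfold find_modified_bowl_alt
  have he : PySem.List.enumerate bowls 0
      = (List.range bowls.length).map
          (fun k => (((k : Nat) : Int), bowls.getD k 0)) := by
    rw [PySem.List.enumerate_eq_map_pyRange bowls 0]
    simp only [PySem.List.len_eq]
    rw [PySem.List.pyRange_zero_nat]
    simp [PySem.List.pyGetD_natCast, List.getD, Function.comp]
  rw [he]
  rw [pv_foldl_last (fun kv : Int × Int => kv.2 < 9) (fun kv : Int × Int => kv.1) _ (-1)]
  rw [← List.map_reverse, List.find?_map]
  have hc : ((fun y : Int × Int => decide (y.2 < 9)) ∘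
        fun k : Nat => (((k : Nat) : Int), bowls.getD k 0))
      = (fun k : Nat => decide (bowls.getD k 0 < 9)) := by
    funext k; simp [List.getD]
  rw [hc]
  cases h : (List.range bowls.length).reverse.find? (fun k => decide (bowls.getD k 0 < 9)) with
  | none => simp
  | some j =>
      have hj : ((j : Int)) ≠ -1 := by omega
      simp [hj]

-- ===== VERDICT (by name: the statement is the Claim_ definition above) =====
theorem find_modified_bowl_spec : Claim_equal_find_modified_bowl := by
  intro bowls _
  unfold Spec_find_modified_bowl
  rw [pvA_eq_common, pvB_eq_common]
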